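-- pv_equiv track=rewrite | github.com/cuongccna/SentimentDataSource | fastapi_social_context.py | _aggregate_data_quality
-- ===== SOURCE A (Python) =====
-- def _aggregate_data_quality(records: list[dict]) -> dict:
--     """
--     Aggregate data quality.
--     - overall: worst state among records
--     - other fields: most frequent state
--     """
--     result = {
--         "overall": "healthy",
--         "availability": "ok",
--         "time_integrity": "ok",
--         "volume": "normal",
--         "source_balance": "normal",
--         "anomaly_frequency": "normal"
--     }
--
--     if not records:
--         return result
--
--     # Severity ordering for "worst"
--     overall_severity = {"healthy": 0, "degraded": 1, "critical": 2}
--     availability_severity = {"ok": 0, "degraded": 1, "down": 2}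
--     time_integrity_severity = {"ok": 0, "unstable": 1, "critical": 2}
--
--     # Collect all values
--     overall_values = []
--     availability_values = []
--     time_integrity_values = []
--     volume_values = []
--     source_balance_values = []
--     anomaly_values = []
--
--     for record in records:
--         dq = record.get("data_quality", {})
--
--         if "overall" in dq:
--             overall_values.append(dq["overall"])
--         if "availability" in dq:
--             availability_values.append(dq["availability"])
--         if "time_integrity" in dq:
--             time_integrity_values.append(dq["time_integrity"])
--         if "volume" in dq:
--             volume_values.append(dq["volume"])
--         if "source_balance" in dq:
--             source_balance_values.append(dq["source_balance"])
--         if "anomaly_frequency" in dq: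
--             anomaly_values.append(dq["anomaly_frequency"])
--
--     # Overall: worst state
--     if overall_values:
--         result["overall"] = max(
--             overall_values,
--             key=lambda x: overall_severity.get(x, 0)
--         )
--
--     # Availability: worst state
--     if availability_values:
--         result["availability"] = max(
--             availability_values,
--             key=lambda x: availability_severity.get(x, 0)
--         )
--
--     # Time integrity: worst state
--     if time_integrity_values:
--         result["time_integrity"] = max(
--             time_integrity_values,
--             key=lambda x: time_integrity_severity.get(x, 0)
--         )
--
--     # Other fields: most frequent
--     def most_frequent(values, default):
--         if not values:
--             return default
--         from collections import Counter
--         counts = Counter(values)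
--         return counts.most_common(1)[0][0]
--
--     result["volume"] = most_frequent(volume_values, "normal")
--     result["source_balance"] = most_frequent(source_balance_values, "normal")
--     result["anomaly_frequency"] = most_frequent(anomaly_values, "normal")
--
--     return result
-- ===== SOURCE B (Python) =====
-- def _bump(w, dq, field, sev):
--     """Running worst: keep (score, value); replace only on strictly greater score."""
--     if field not in dq:
--         return w
--     v = dq[field]
--     s = sev.get(v, 0)
--     if w is None or s > w[0]:
--         return (s, v)
--     return w
--
--
-- def _tally(cnt, dq, field):
--     if field in dq:
--         v = dq[field]
--         cnt[v] = cnt.get(v, 0) + 1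
--
--
-- def _top(cnt, default):
--     """First key with the maximal count (insertion order), or default if empty."""
--     best = None
--     for kv in cnt.items():
--         if best is None or kv[1] > best[1]:
--             best = kv
--     return default if best is None else best[0]
--
--
-- def _aggregate_data_quality(records: list[dict]) -> dict:
--     overall_sev = {"healthy": 0, "degraded": 1, "critical": 2}
--     avail_sev = {"ok": 0, "degraded": 1, "down": 2}
--     time_sev = {"ok": 0, "unstable": 1, "critical": 2}
--
--     worst_o = worst_a = worst_t = None
--     cnt_vol, cnt_bal, cnt_an = {}, {}, {}
--
--     for record in records:
--         dq = record.get("data_quality", {})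
--         worst_o = _bump(worst_o, dq, "overall", overall_sev)
--         worst_a = _bump(worst_a, dq, "availability", avail_sev)
--         worst_t = _bump(worst_t, dq, "time_integrity", time_sev)
--         _tally(cnt_vol, dq, "volume")
--         _tally(cnt_bal, dq, "source_balance")
--         _tally(cnt_an, dq, "anomaly_frequency")
--
--     return {
--         "overall": "healthy" if worst_o is None else worst_o[1],
--         "availability": "ok" if worst_a is None else worst_a[1],
--         "time_integrity": "ok" if worst_t is None else worst_t[1],
--         "volume": _top(cnt_vol, "normal"),
--         "source_balance": _top(cnt_bal, "normal"),
--         "anomaly_frequency": _top(cnt_an, "normal"),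
--     }
-- ===== Notes on version B (the rewrite author's own statement) =====
-- stated objective: alternative
-- what changed: A collects six per-field value lists in one pass and then reduces each with max(key=severity) or Counter.most_common; B does a single pass over records maintaining a running worst (score, value) per severity field and incremental counters per frequency field, materialising no intermediate lists, then reads the answers off that state.
import Mathlib
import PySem

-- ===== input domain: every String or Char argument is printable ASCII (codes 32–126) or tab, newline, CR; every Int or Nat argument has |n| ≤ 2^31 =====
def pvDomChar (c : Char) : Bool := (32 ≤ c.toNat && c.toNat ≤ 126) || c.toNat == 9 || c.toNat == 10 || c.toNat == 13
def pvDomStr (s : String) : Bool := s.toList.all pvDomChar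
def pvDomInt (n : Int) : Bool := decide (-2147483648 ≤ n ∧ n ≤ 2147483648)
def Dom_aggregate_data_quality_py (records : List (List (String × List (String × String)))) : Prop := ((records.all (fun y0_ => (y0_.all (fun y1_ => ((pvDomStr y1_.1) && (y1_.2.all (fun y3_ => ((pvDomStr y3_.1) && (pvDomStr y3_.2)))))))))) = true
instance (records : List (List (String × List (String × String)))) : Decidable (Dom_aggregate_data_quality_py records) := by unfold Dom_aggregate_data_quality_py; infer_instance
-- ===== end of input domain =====

-- B replaces A's collect-six-lists-then-reduce structure by a single pass keeping a running
-- worst (score, value) per severity field and incremental counters per frequency field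
-- (objective: alternative single-pass decomposition, no intermediate lists).

-- ===== PORT A =====
-- record.get("data_quality", {}) read through the record dict
def pvDq (record : List (String × List (String × String))) : PySem.Dict String String :=
  PySem.Dict.mk (((PySem.Dict.mk record).get? "data_quality").getD [])

def pvSevOverall : PySem.Dict String Int :=
  PySem.Dict.mk [("healthy", 0), ("degraded", 1), ("critical", 2)]
def pvSevAvail : PySem.Dict String Int :=
  PySem.Dict.mk [("ok", 0), ("degraded", 1), ("down", 2)]
def pvSevTime : PySem.Dict String Int :=
  PySem.Dict.mk [("ok", 0), ("unstable", 1), ("critical", 2)]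

-- 'if field in dq: values.append(dq[field])'
def pvAppendIf (dq : PySem.Dict String String) (field : String) (xs : List String) : List String :=
  match dq.get? field with
  | some v => xs ++ [v]
  | none => xs

-- the collecting loop of A: one pass appending to six value lists
def pvStepA (acc : List String × List String × List String × List String × List String × List String)
    (record : List (String × List (String × String))) :
    List String × List String × List String × List String × List String × List String :=
  let dq := pvDq record
  (pvAppendIf dq "overall" acc.1,
   pvAppendIf dq "availability" acc.2.1,
   pvAppendIf dq "time_integrity" acc.2.2.1,
   pvAppendIf dq "volume" acc.2.2.2.1,
   pvAppendIf dq "source_balance" acc.2.2.2.2.1,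
   pvAppendIf dq "anomaly_frequency" acc.2.2.2.2.2)

-- max(values, key=lambda x: severity.get(x, 0)) — Python max keeps the FIRST maximal element
def pvWorstVal (values : List String) (sev : PySem.Dict String Int) (dflt : String) : String :=
  match PySem.List.max? values (fun x => sev.getD x 0) with
  | some m => m
  | none => dflt

-- most_frequent: Counter(values).most_common(1)[0][0] = first key of maximal count
def pvMostFrequent (values : List String) (dflt : String) : String :=
  if values = [] then dflt
  else
    match PySem.List.max? (PySem.Dict.counter values).items (fun kv => kv.2) with
    | some kv => kv.1
    | none => dflt

def aggregate_data_quality_py (records : List (List (String × List (String × String)))) : List (String × String) :=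
  let result : PySem.Dict String String :=
    ((((((PySem.Dict.empty.insert "overall" "healthy").insert "availability" "ok").insert
        "time_integrity" "ok").insert "volume" "normal").insert "source_balance" "normal").insert
        "anomaly_frequency" "normal")
  if records = [] then result.items
  else
    let c := records.foldl pvStepA ([], [], [], [], [], [])
    let result := if c.1 ≠ [] then result.insert "overall" (pvWorstVal c.1 pvSevOverall "healthy") else result
    let result := if c.2.1 ≠ [] then result.insert "availability" (pvWorstVal c.2.1 pvSevAvail "ok") else result
    let result := if c.2.2.1 ≠ [] then result.insert "time_integrity" (pvWorstVal c.2.2.1 pvSevTime "ok") else result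
    let result := result.insert "volume" (pvMostFrequent c.2.2.2.1 "normal")
    let result := result.insert "source_balance" (pvMostFrequent c.2.2.2.2.1 "normal")
    let result := result.insert "anomaly_frequency" (pvMostFrequent c.2.2.2.2.2 "normal")
    result.items

-- ===== PORT B =====
def pvDqB (record : List (String × List (String × String))) : PySem.Dict String String :=
  PySem.Dict.mk (((PySem.Dict.mk record).get? "data_quality").getD [])

def pvSevOverallB : PySem.Dict String Int :=
  PySem.Dict.mk [("healthy", 0), ("degraded", 1), ("critical", 2)]
def pvSevAvailB : PySem.Dict String Int :=
  PySem.Dict.mk [("ok", 0), ("degraded", 1), ("down", 2)]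
def pvSevTimeB : PySem.Dict String Int :=
  PySem.Dict.mk [("ok", 0), ("unstable", 1), ("critical", 2)]

-- _bump: running worst, replaced only on strictly greater severity score
def pvBump (w : Option (Int × String)) (dq : PySem.Dict String String) (field : String)
    (sev : PySem.Dict String Int) : Option (Int × String) :=
  match dq.get? field with
  | none => w
  | some v =>
    let s := sev.getD v 0
    match w with
    | none => some (s, v)
    | some b => if s > b.1 then some (s, v) else some b

-- _tally: cnt[v] = cnt.get(v, 0) + 1
def pvTally (cnt : PySem.Dict String Int) (dq : PySem.Dict String String) (field : String) :
    PySem.Dict String Int :=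
  match dq.get? field with
  | none => cnt
  | some v => cnt.insert v (cnt.getD v 0 + 1)

-- _top: first key with maximal count, or default if the counter is empty
def pvTop (cnt : PySem.Dict String Int) (dflt : String) : String :=
  match cnt.items.foldl
      (fun best kv =>
        match best with
        | none => some kv
        | some b => if kv.2 > b.2 then some kv else some b) none with
  | none => dflt
  | some b => b.1

def pvStepB
    (st : Option (Int × String) × Option (Int × String) × Option (Int × String) ×
          PySem.Dict String Int × PySem.Dict String Int × PySem.Dict String Int)
    (record : List (String × List (String × String))) :
    Option (Int × String) × Option (Int × String) × Option (Int × String) ×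
    PySem.Dict String Int × PySem.Dict String Int × PySem.Dict String Int :=
  let dq := pvDqB record
  (pvBump st.1 dq "overall" pvSevOverallB,
   pvBump st.2.1 dq "availability" pvSevAvailB,
   pvBump st.2.2.1 dq "time_integrity" pvSevTimeB,
   pvTally st.2.2.2.1 dq "volume",
   pvTally st.2.2.2.2.1 dq "source_balance",
   pvTally st.2.2.2.2.2 dq "anomaly_frequency")

def aggregate_data_quality_py_alt (records : List (List (String × List (String × String)))) : List (String × String) :=
  let st := records.foldl pvStepB (none, none, none, PySem.Dict.empty, PySem.Dict.empty, PySem.Dict.empty)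
  [("overall", match st.1 with | none => "healthy" | some b => b.2),
   ("availability", match st.2.1 with | none => "ok" | some b => b.2),
   ("time_integrity", match st.2.2.1 with | none => "ok" | some b => b.2),
   ("volume", pvTop st.2.2.2.1 "normal"),
   ("source_balance", pvTop st.2.2.2.2.1 "normal"),
   ("anomaly_frequency", pvTop st.2.2.2.2.2 "normal")]

-- ===== PRECONDITION & SPEC =====
def Spec_aggregate_data_quality_py (records : List (List (String × List (String × String)))) (out : List (String × String)) : Prop := out = aggregate_data_quality_py_alt records
instance (records : List (List (String × List (String × String)))) (out : List (String × String)) : Decidable (Spec_aggregate_data_quality_py records out) := by unfold Spec_aggregate_data_quality_py; infer_instance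

-- ===== CLAIM (what is proved, stated in full; the proofs are below) =====
def Claim_equal_aggregate_data_quality_py : Prop := ∀ (records : List (List (String × List (String × String)))), Dom_aggregate_data_quality_py records → Spec_aggregate_data_quality_py records (aggregate_data_quality_py records)

-- ===== LEMMAS AND PROOFS =====

-- the six value lists A collects, as one expression per field
def pvVals (field : String) (records : List (List (String × List (String × String)))) : List String :=
  records.flatMap (fun r => ((pvDq r).get? field).toList)

theorem pvDqB_eq (r : List (String × List (String × String))) : pvDqB r = pvDq r := rfl

theorem pvAppendIf_eq (dq : PySem.Dict String String) (field : String) (xs : List String) :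
    pvAppendIf dq field xs = xs ++ ((dq.get? field).toList) := by
  cases h : dq.get? field <;> simp [pvAppendIf, h]

theorem pvCollect (records : List (List (String × List (String × String))))
    (a1 a2 a3 a4 a5 a6 : List String) :
    records.foldl pvStepA (a1, a2, a3, a4, a5, a6) =
      (a1 ++ pvVals "overall" records, a2 ++ pvVals "availability" records,
       a3 ++ pvVals "time_integrity" records, a4 ++ pvVals "volume" records,
       a5 ++ pvVals "source_balance" records, a6 ++ pvVals "anomaly_frequency" records) := by
  induction records generalizing a1 a2 a3 a4 a5 a6 with
  | nil => simp [pvVals]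
  | cons r rest ih =>
      simp only [List.foldl_cons, pvStepA, pvAppendIf_eq, ih, pvVals, List.flatMap_cons,
        List.append_assoc]

-- B's per-value worst step (what pvBump does to each present value)
def pvStepW (sev : PySem.Dict String Int) (w : Option (Int × String)) (v : String) :
    Option (Int × String) :=
  let s := sev.getD v 0
  match w with
  | none => some (s, v)
  | some b => if s > b.1 then some (s, v) else some b

theorem pvBump_eq (w : Option (Int × String)) (dq : PySem.Dict String String) (field : String)
    (sev : PySem.Dict String Int) :
    pvBump w dq field sev = ((dq.get? field).toList).foldl (pvStepW sev) w := by
  cases h : dq.get? field <;> simp [pvBump, pvStepW, h]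

-- B's per-value tally step
def pvStepC (cnt : PySem.Dict String Int) (v : String) : PySem.Dict String Int :=
  cnt.insert v (cnt.getD v 0 + 1)

theorem pvTally_eq (cnt : PySem.Dict String Int) (dq : PySem.Dict String String) (field : String) :
    pvTally cnt dq field = ((dq.get? field).toList).foldl pvStepC cnt := by
  cases h : dq.get? field <;> simp [pvTally, pvStepC, h]

theorem pvStateB (records : List (List (String × List (String × String))))
    (w1 w2 w3 : Option (Int × String)) (c1 c2 c3 : PySem.Dict String Int) :
    records.foldl pvStepB (w1, w2, w3, c1, c2, c3) =
      ((pvVals "overall" records).foldl (pvStepW pvSevOverallB) w1,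
       (pvVals "availability" records).foldl (pvStepW pvSevAvailB) w2,
       (pvVals "time_integrity" records).foldl (pvStepW pvSevTimeB) w3,
       (pvVals "volume" records).foldl pvStepC c1,
       (pvVals "source_balance" records).foldl pvStepC c2,
       (pvVals "anomaly_frequency" records).foldl pvStepC c3) := by
  induction records generalizing w1 w2 w3 c1 c2 c3 with
  | nil => simp [pvVals]
  | cons r rest ih =>
      simp only [List.foldl_cons, pvStepB, pvDqB_eq, pvBump_eq, pvTally_eq, ih, pvVals,
        List.flatMap_cons, List.foldl_append]

-- running (score, value) pair ≡ running first-maximal element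
theorem pvWorst_fold (sev : PySem.Dict String Int) (vals : List String) (acc : Option String) :
    vals.foldl (pvStepW sev) (acc.map (fun m => (sev.getD m 0, m))) =
      (vals.foldl
        (fun a x =>
          match a with
          | none => some x
          | some m => if sev.getD m 0 < sev.getD x 0 then some x else some m) acc).map
        (fun m => (sev.getD m 0, m)) := by
  induction vals generalizing acc with
  | nil => rfl
  | cons v rest ih =>
      cases acc with
      | none => simpa [pvStepW] using ih (some v)
      | some m =>
          by_cases h : sev.getD m 0 < sev.getD v 0
          · simpa [pvStepW, h] using ih (some v)
          · simpa [pvStepW, h] using ih (some m)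

theorem pvWorst_fold_none (sev : PySem.Dict String Int) (vals : List String) :
    vals.foldl (pvStepW sev) none =
      (PySem.List.max? vals (fun x => sev.getD x 0)).map (fun m => (sev.getD m 0, m)) := by
  have hmax : PySem.List.max? vals (fun x => sev.getD x 0) =
      vals.foldl
        (fun a x =>
          match a with
          | none => some x
          | some m => if sev.getD m 0 < sev.getD x 0 then some x else some m) none := by
    simp only [PySem.List.max?]
    apply PySem.List.foldl_congr_mem
    intro a x _
    cases a <;> rfl
  rw [hmax]
  have h2 := pvWorst_fold sev vals none
  simpa using h2

-- the worst-field value: A's conditional max vs B's running pair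
theorem pvWorst_field (sev : PySem.Dict String Int) (vals : List String) (dflt : String) :
    (match vals.foldl (pvStepW sev) none with
     | none => dflt
     | some b => b.2) =
      (if vals = [] then dflt else pvWorstVal vals sev dflt) := by
  rw [pvWorst_fold_none]
  cases h : PySem.List.max? vals (fun x => sev.getD x 0) with
  | none =>
      have hv : vals = [] := (PySem.List.max?_eq_none_iff vals _).mp h
      simp [hv]
  | some m =>
      have hv : vals ≠ [] := by
        intro hv
        rw [hv, (PySem.List.max?_eq_none_iff [] _).mpr rfl] at h
        exact (Option.some_ne_none m h.symm).elim
      simp [pvWorstVal, h, hv]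

-- B's _top on an incremental counter vs A's most_frequent on the collected list
theorem pvTop_counter (vals : List String) (dflt : String) :
    pvTop (vals.foldl pvStepC PySem.Dict.empty) dflt = pvMostFrequent vals dflt := by
  have hc : vals.foldl pvStepC PySem.Dict.empty = PySem.Dict.counter vals :=
    PySem.Dict.foldl_insert_getD_add_one_eq_counter vals
  rw [hc]
  have hfold : (PySem.Dict.counter vals).items.foldl
      (fun best kv =>
        match best with
        | none => some kv
        | some b => if kv.2 > b.2 then some kv else some b) none =
      PySem.List.max? (PySem.Dict.counter vals).items (fun kv => kv.2) := by
    simp only [PySem.List.max?]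
    apply PySem.List.foldl_congr_mem
    intro a x _
    cases a <;> rfl
  by_cases h : vals = []
  · subst h; rfl
  · rw [pvTop, hfold]
    cases hm : PySem.List.max? (PySem.Dict.counter vals).items (fun kv => kv.2) <;>
      simp [pvMostFrequent, h, hm]

theorem pvSevOverallB_eq : pvSevOverallB = pvSevOverall := rfl
theorem pvSevAvailB_eq : pvSevAvailB = pvSevAvail := rfl
theorem pvSevTimeB_eq : pvSevTimeB = pvSevTime := rfl

-- ===== VERDICT (by name: the statement is the Claim_ definition above) =====
theorem aggregate_data_quality_py_spec : Claim_equal_aggregate_data_quality_py := by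
  intro records _
  unfold Spec_aggregate_data_quality_py
  by_cases hr : records = []
  · subst hr; rfl
  · simp only [aggregate_data_quality_py, aggregate_data_quality_py_alt, if_neg hr,
      pvCollect, pvStateB, List.nil_append, pvSevOverallB_eq, pvSevAvailB_eq, pvSevTimeB_eq]
    rw [pvWorst_field, pvWorst_field, pvWorst_field, pvTop_counter, pvTop_counter, pvTop_counter]
    by_cases h1 : pvVals "overall" records = [] <;>
      by_cases h2 : pvVals "availability" records = [] <;>
        by_cases h3 : pvVals "time_integrity" records = [] <;>
          simp only [h1, h2, h3, ne_eq, not_true_eq_false, not_false_eq_true, if_true,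
            if_false] <;> rfl
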